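-- pv_equiv track=rewrite | github.com/fleshmetal/traverse | src/traverse/graph/user_overlap.py | _build_artist_lookup
-- ===== SOURCE A (Python) =====
-- from collections import defaultdict
-- from typing import Any, Dict, List, Optional, Tuple
--
-- def _build_artist_lookup(
--     records: List[Dict[str, Any]],
-- ) -> Dict[str, List[Dict[str, Any]]]:
--     """Group records by lowercased artist name."""
--     lookup: Dict[str, List[Dict[str, Any]]] = defaultdict(list)
--     for rec in records:
--         artist = rec.get("artist")
--         if artist:
--             lookup[artist.lower()].append(rec)
--     return dict(lookup)
-- ===== SOURCE B (Python) =====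
-- from typing import Any, Dict, List
--
--
-- def _build_artist_lookup(
--     records: List[Dict[str, Any]],
-- ) -> Dict[str, List[Dict[str, Any]]]:
--     """Group records by lowercased artist name (filter once, dedup keys, gather per key)."""
--     keyed = [(rec["artist"].lower(), rec) for rec in records if rec.get("artist")]
--     keys = list(dict.fromkeys(k for k, _ in keyed))
--     return {k: [rec for kk, rec in keyed if kk == k] for k in keys}
-- ===== Notes on version B (the rewrite author's own statement) =====
-- stated objective: alternative
-- what changed: Replaced the single-pass defaultdict bucketing with: one filtered keyed list, an ordered key dedup, and a per-key gathering comprehension (no dict accumulator).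
import Mathlib
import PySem

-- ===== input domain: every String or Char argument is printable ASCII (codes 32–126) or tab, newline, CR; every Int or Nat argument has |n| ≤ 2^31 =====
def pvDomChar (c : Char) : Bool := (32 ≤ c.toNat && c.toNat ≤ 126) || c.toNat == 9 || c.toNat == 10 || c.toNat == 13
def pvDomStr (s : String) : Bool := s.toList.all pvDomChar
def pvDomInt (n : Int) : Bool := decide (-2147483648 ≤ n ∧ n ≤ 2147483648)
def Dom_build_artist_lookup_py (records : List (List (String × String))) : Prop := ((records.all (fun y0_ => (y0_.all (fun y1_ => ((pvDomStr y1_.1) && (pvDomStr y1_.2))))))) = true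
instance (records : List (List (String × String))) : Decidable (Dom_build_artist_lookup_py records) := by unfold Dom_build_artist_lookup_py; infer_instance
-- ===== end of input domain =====

-- B groups records by filtering once, deduplicating the lowercased keys in first-seen order, and
-- gathering each group with a per-key scan, instead of A's single-pass defaultdict bucketing
-- (alternative decomposition, not faster).


-- ===== PORT A =====
-- rec.get("artist") on the Python dict a record denotes (assoc list, later key wins as in dict(pairs))
def recArtist? (rec : List (String × String)) : Option String :=
  (PySem.Dict.ofList rec).get? "artist"

def build_artist_lookup_py (records : List (List (String × String))) : List (String × List (List (String × String))) :=
  -- lookup = defaultdict(list); for rec: artist = rec.get("artist"); if artist: lookup[artist.lower()].append(rec)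
  (records.foldl
    (fun (d : PySem.Dict String (List (List (String × String)))) rec =>
      match recArtist? rec with
      | none => d
      | some artist =>
          if artist = "" then d
          else d.modify (PySem.Str.lower artist) [] (· ++ [rec]))
    PySem.Dict.empty).items

-- ===== PORT B =====
-- truthiness of rec.get("artist") (None or "" are falsy)
def recHasArtist (rec : List (String × String)) : Bool :=
  match recArtist? rec with
  | none => false
  | some a => a ≠ ""

def build_artist_lookup_py_alt (records : List (List (String × String))) : List (String × List (List (String × String))) :=
  -- keyed = [(rec["artist"].lower(), rec) for rec in records if rec.get("artist")]
  -- (rec["artist"] cannot raise: the filter guarantees the key is present; ported as getD "")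
  let keyed := (records.filter recHasArtist).map
    (fun r => (PySem.Str.lower ((recArtist? r).getD ""), r))
  -- keys = list(dict.fromkeys(k for k, _ in keyed))
  let keys := PySem.List.dedup (keyed.map (·.1))
  -- {k: [rec for kk, rec in keyed if kk == k] for k in keys}
  keys.map (fun k => (k, (keyed.filter (fun p => p.1 == k)).map (·.2)))

-- ===== PRECONDITION & SPEC =====
def Spec_build_artist_lookup_py (records : List (List (String × String))) (out : List (String × List (List (String × String)))) : Prop := out = build_artist_lookup_py_alt records
instance (records : List (List (String × String))) (out : List (String × List (List (String × String)))) : Decidable (Spec_build_artist_lookup_py records out) := by unfold Spec_build_artist_lookup_py; infer_instance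

-- ===== CLAIM (what is proved, stated in full; the proofs are below) =====
def Claim_equal_build_artist_lookup_py : Prop := ∀ (records : List (List (String × String))), Dom_build_artist_lookup_py records → Spec_build_artist_lookup_py records (build_artist_lookup_py records)

-- ===== LEMMAS AND PROOFS =====

-- A's fold over records is the modify-fold over B's keyed list
theorem foldA_eq_foldl_keyed (records : List (List (String × String)))
    (d : PySem.Dict String (List (List (String × String)))) :
    records.foldl
      (fun d rec =>
        match recArtist? rec with
        | none => d
        | some artist =>
            if artist = "" then d
            else d.modify (PySem.Str.lower artist) [] (· ++ [rec]))
      d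
    = (((records.filter recHasArtist).map
        (fun r => (PySem.Str.lower ((recArtist? r).getD ""), r))).foldl
        (fun d p => d.modify p.1 [] (· ++ [p.2])) d) := by
  induction records generalizing d with
  | nil => rfl
  | cons r rs ih =>
    simp only [List.foldl_cons, List.filter_cons]
    cases h : recArtist? r with
    | none => simp [recHasArtist, h, ih]
    | some a =>
      by_cases ha : a = "" <;>
        simp [recHasArtist, h, ha, ih]

theorem build_artist_lookup_py_spec' (records : List (List (String × String))) :
    build_artist_lookup_py records = build_artist_lookup_py_alt records := by
  unfold build_artist_lookup_py build_artist_lookup_py_alt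
  rw [foldA_eq_foldl_keyed]
  set keyed := (records.filter recHasArtist).map
    (fun r => (PySem.Str.lower ((recArtist? r).getD ""), r)) with hk
  have hnd : (keyed.foldl (fun d p => d.modify p.1 [] (· ++ [p.2]))
      (PySem.Dict.empty : PySem.Dict String (List (List (String × String))))).keys.Nodup := by
    exact PySem.Dict.nodup_keys_foldl_modify_key keyed (·.1) [] (fun _ p => (· ++ [p.2])) _
      PySem.Dict.nodup_keys_empty
  rw [PySem.Dict.items_eq_map_keys _ hnd []]
  have hkeys : (keyed.foldl (fun d p => d.modify p.1 [] (· ++ [p.2]))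
      (PySem.Dict.empty : PySem.Dict String (List (List (String × String))))).keys
      = PySem.List.dedup (keyed.map (·.1)) := by
    rw [PySem.Dict.keys_foldl_modify_key]
    simp [PySem.Dict.keys_empty, PySem.Set.update_nil_left, PySem.List.dedup_eq_ofList]
  rw [hkeys]
  refine List.map_congr_left (fun k _ => ?_)
  rw [PySem.Dict.getD_foldl_modify_append]
  simp [PySem.Dict.getD_empty]

-- ===== VERDICT (by name: the statement is the Claim_ definition above) =====
theorem build_artist_lookup_py_spec : Claim_equal_build_artist_lookup_py := by
  intro records _
  exact build_artist_lookup_py_spec' records
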